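-- pv_equiv track=rewrite | github.com/GeoffMurphy/IM_Gibbs | gibbs_utils.py | chunk_arrays
-- ===== SOURCE A (Python) =====
-- def chunk_arrays(first_array, second_array):
--     # Ensure both arrays have the same length
--     assert len(first_array) == len(second_array), "Both arrays must be of the same length."
--
--     # Initialize the list of chunks for both arrays
--     chunked_first_array = []
--     chunked_second_array = []
--
--     # Initialize the current chunk start
--     current_start = 0
--
--     # Iterate over the array to find chunks
--     for i in range(1, len(first_array)):
--         if first_array[i] != first_array[current_start]:
--             # If the current value is different from the chunk start, cut the chunk for both arrays
--             chunked_first_array.append(first_array[current_start:i])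
--             chunked_second_array.append(second_array[current_start:i])
--             current_start = i  # Update the chunk start to the current index
--
--     # Add the last chunk
--     chunked_first_array.append(first_array[current_start:])
--     chunked_second_array.append(second_array[current_start:])
--
--     return chunked_first_array, chunked_second_array
-- ===== SOURCE B (Python) =====
-- def chunk_arrays(first_array, second_array):
--     # Ensure both arrays have the same length
--     assert len(first_array) == len(second_array), "Both arrays must be of the same length."
--
--     # Stage 1: compute the cut positions — 0, every index where the value changes, and n.
--     n = len(first_array)
--     cuts = [0] + [i + 1 for i in range(n - 1) if first_array[i] != first_array[i + 1]] + [n]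
--
--     # Stage 2: slice both arrays at consecutive cut pairs.
--     pairs = list(zip(cuts, cuts[1:]))
--     chunked_first_array = [first_array[lo:hi] for lo, hi in pairs]
--     chunked_second_array = [second_array[lo:hi] for lo, hi in pairs]
--
--     return chunked_first_array, chunked_second_array
-- ===== Notes on version B (the rewrite author's own statement) =====
-- stated objective: alternative
-- what changed: Replaces A's online single pass (run-start pointer, conditional append inside the loop, unconditional trailing last-chunk append) with two staged passes: first compute the full list of cut indices [0]+changes+[n] from adjacent-pair inequality, then slice both arrays at consecutive cut pairs.
import Mathlib
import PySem

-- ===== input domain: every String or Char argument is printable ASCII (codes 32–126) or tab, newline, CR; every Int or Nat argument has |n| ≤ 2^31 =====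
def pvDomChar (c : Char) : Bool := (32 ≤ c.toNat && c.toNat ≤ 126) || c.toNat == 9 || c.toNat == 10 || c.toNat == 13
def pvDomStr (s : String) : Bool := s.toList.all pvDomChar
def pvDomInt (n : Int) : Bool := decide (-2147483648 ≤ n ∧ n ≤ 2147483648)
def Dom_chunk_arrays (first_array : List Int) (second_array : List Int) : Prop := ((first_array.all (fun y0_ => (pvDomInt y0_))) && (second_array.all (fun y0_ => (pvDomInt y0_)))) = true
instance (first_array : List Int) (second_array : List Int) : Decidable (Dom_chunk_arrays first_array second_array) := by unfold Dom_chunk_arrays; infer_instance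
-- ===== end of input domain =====

-- B replaces A's online loop (run-start pointer, conditional append, trailing last-chunk append)
-- by two staged passes: first compute the list of cut indices, then slice both arrays at
-- consecutive cut pairs; same values everywhere (objective: simpler/staged decomposition).

-- ===== PORT A =====
-- loop body of A's 'for i in range(1, len(first_array))'; state = ((chunked_first, chunked_second), current_start)
def aStep (first_array second_array : List Int)
    (st : (List (List Int) × List (List Int)) × Int) (i : Int) :
    (List (List Int) × List (List Int)) × Int :=
  if PySem.List.pyGet? first_array i ≠ PySem.List.pyGet? first_array st.2 then
    ((st.1.1 ++ [PySem.List.slice first_array (some st.2) (some i)],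
      st.1.2 ++ [PySem.List.slice second_array (some st.2) (some i)]), i)
  else st

def chunk_arrays (first_array : List Int) (second_array : List Int) : List (List Int) × List (List Int) :=
  let st := (PySem.List.pyRange 1 (first_array.length : Int) 1).foldl
      (aStep first_array second_array) (([], []), 0)
  (st.1.1 ++ [PySem.List.slice first_array (some st.2) none],
   st.1.2 ++ [PySem.List.slice second_array (some st.2) none])

-- ===== PORT B =====
-- the comprehension '[i + 1 for i in range(n - 1) if first_array[i] != first_array[i + 1]]'
def pvChanges (f : List Int) : List Nat :=
  ((List.range (f.length - 1)).filter (fun i => decide (f[i]? ≠ f[i + 1]?))).map (· + 1)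

-- cuts = [0] + changes + [n]
def pvCuts (f : List Int) : List Nat := 0 :: (pvChanges f ++ [f.length])

-- the Python slice a[lo:hi] for 0 ≤ lo ≤ hi ≤ len(a)
def pvSliceAt (a : List Int) (p : Nat × Nat) : List Int := (a.drop p.1).take (p.2 - p.1)

def chunk_arrays_alt (first_array : List Int) (second_array : List Int) : List (List Int) × List (List Int) :=
  let cuts := pvCuts first_array
  let pairs := cuts.zip cuts.tail
  (pairs.map (pvSliceAt first_array), pairs.map (pvSliceAt second_array))

-- ===== PRECONDITION & SPEC =====
-- A's assert raises AssertionError when the lengths differ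
def Pre_chunk_arrays (first_array : List Int) (second_array : List Int) : Prop :=
  first_array.length = second_array.length
instance (first_array : List Int) (second_array : List Int) : Decidable (Pre_chunk_arrays first_array second_array) := by unfold Pre_chunk_arrays; infer_instance

def pvWitness_chunk_arrays : List Int × List Int := ([1, 1, 2], [5, 6, 7])

def Spec_chunk_arrays (first_array : List Int) (second_array : List Int) (out : List (List Int) × List (List Int)) : Prop := out = chunk_arrays_alt first_array second_array
instance (first_array : List Int) (second_array : List Int) (out : List (List Int) × List (List Int)) : Decidable (Spec_chunk_arrays first_array second_array out) := by unfold Spec_chunk_arrays; infer_instance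

-- ===== CLAIM (what is proved, stated in full; the proofs are below) =====
def Claim_equal_chunk_arrays : Prop := ∀ (first_array : List Int) (second_array : List Int), Dom_chunk_arrays first_array second_array → Pre_chunk_arrays first_array second_array → Spec_chunk_arrays first_array second_array (chunk_arrays first_array second_array)

-- ===== LEMMAS AND PROOFS =====

-- proof-only intermediate: the run-by-run recursion both ports are reduced to
def runLen (x : Int) : List Int → Nat
  | [] => 0
  | y :: ys => if y = x then runLen x ys + 1 else 0

def chunkGo : Nat → List Int → List Int → List (List Int) × List (List Int)
  | _, [], _ => ([], [])
  | 0, _ :: _, _ => ([], [])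
  | fuel + 1, x :: xs, s =>
    let j := runLen x xs + 1
    let rest := chunkGo fuel ((x :: xs).drop j) (s.drop j)
    ((x :: xs).take j :: rest.1, s.take j :: rest.2)

lemma chunkGo_nil (n : Nat) (s : List Int) : chunkGo n [] s = ([], []) := by
  cases n <;> rfl

lemma runLen_le (x : Int) (xs : List Int) : runLen x xs ≤ xs.length := by
  induction xs with
  | nil => simp [runLen]
  | cons y ys ih => simp only [runLen]; split <;> simp <;> omega

lemma runLen_get (x : Int) (xs : List Int) : ∀ k, k < runLen x xs → xs[k]? = some x := by
  induction xs with
  | nil => simp [runLen]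
  | cons y ys ih =>
    intro k hk
    simp only [runLen] at hk
    split at hk
    · cases k with
      | zero => simp [*]
      | succ k => simpa using ih k (by omega)
    · omega

lemma runLen_stop (x : Int) (xs : List Int) : xs[runLen x xs]? ≠ some x := by
  induction xs with
  | nil => simp [runLen]
  | cons y ys ih =>
    simp only [runLen]
    split
    · simpa using ih
    · simp [*]

lemma chunkGo_fuel : ∀ (k : Nat) (f s : List Int), f.length ≤ k →
    ∀ n m : Nat, f.length ≤ n → f.length ≤ m → chunkGo n f s = chunkGo m f s := by
  intro k
  induction k using Nat.strong_induction_on with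
  | _ k IH =>
    intro f s hk n m hn hm
    match f with
    | [] => rw [chunkGo_nil, chunkGo_nil]
    | x :: xs =>
      simp only [List.length_cons] at hk hn hm
      match n, m with
      | n + 1, m + 1 =>
        simp only [chunkGo]
        have hd : ((x :: xs).drop (runLen x xs + 1)).length < k := by
          have := runLen_le x xs; simp; omega
        rw [IH ((x :: xs).drop (runLen x xs + 1)).length hd _ _ le_rfl n m
              (by have := runLen_le x xs; simp; omega)
              (by have := runLen_le x xs; simp; omega)]

-- ---- A's fold equals chunkGo (run-by-run characterisation of A) ----

lemma fold_id (f s : List Int) (cf cs : List (List Int)) (cur : Nat) :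
    ∀ j : Nat, cur + 1 ≤ j → (∀ i : Nat, cur < i → i < j → f[i]? = f[cur]?) →
    (PySem.List.pyRange ((cur : Int) + 1) (j : Int) 1).foldl (aStep f s) ((cf, cs), (cur : Int))
      = ((cf, cs), (cur : Int)) := by
  intro j
  induction j with
  | zero => omega
  | succ j ih =>
    intro hle hrun
    by_cases hj : cur + 1 ≤ j
    · have hsplit : PySem.List.pyRange ((cur : Int) + 1) ((j + 1 : Nat) : Int) 1
          = PySem.List.pyRange ((cur : Int) + 1) (j : Int) 1 ++ [(j : Int)] := by
        have h := PySem.List.pyRange_one_succ_right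
          (a := (cur : Int) + 1) (b := (j : Int)) (by exact_mod_cast hj)
        push_cast
        exact h
      rw [hsplit, List.foldl_append, ih hj (fun i h1 h2 => hrun i h1 (by omega))]
      simp only [List.foldl_cons, List.foldl_nil, aStep]
      have hget : PySem.List.pyGet? f (j : Int) = PySem.List.pyGet? f (cur : Int) := by
        simp only [PySem.List.pyGet?_natCast]
        exact hrun j (by omega) (by omega)
      simp [hget]
    · have hcj : j = cur := by omega
      subst hcj
      have h0 : PySem.List.pyRange ((j : Int) + 1) ((j + 1 : Nat) : Int) 1 = [] := by
        apply PySem.List.pyRange_one_eq_nil; push_cast; omega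
      rw [h0]; simp

lemma main_lemma (f s : List Int) (hlen : s.length = f.length) :
    ∀ (d cur : Nat) (cf cs : List (List Int)), cur < f.length → f.length - cur = d →
    (let st := (PySem.List.pyRange ((cur : Int) + 1) (f.length : Int) 1).foldl
        (aStep f s) ((cf, cs), (cur : Int))
     (st.1.1 ++ [PySem.List.slice f (some st.2) none],
      st.1.2 ++ [PySem.List.slice s (some st.2) none]))
    = (cf ++ (chunkGo (f.drop cur).length (f.drop cur) (s.drop cur)).1,
       cs ++ (chunkGo (f.drop cur).length (f.drop cur) (s.drop cur)).2) := by
  intro d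
  induction d using Nat.strong_induction_on with
  | _ d IH =>
    intro cur cf cs hcur hd
    have hx : f.drop cur = f[cur] :: f.drop (cur + 1) := List.drop_eq_getElem_cons hcur
    set x := f[cur] with hxdef
    set xs := f.drop (cur + 1) with hxs
    set r := runLen x xs with hr
    have hxslen : xs.length = f.length - (cur + 1) := by simp [hxs]
    have hrle : r ≤ f.length - (cur + 1) := by rw [← hxslen]; exact runLen_le x xs
    have hdlen : (f.drop cur).length = f.length - cur := by simp
    have hcurget : f[cur]? = some x := by simp [hxdef, List.getElem?_eq_getElem hcur]
    have hrun : ∀ i : Nat, cur < i → i < cur + 1 + r → f[i]? = f[cur]? := by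
      intro i h1 h2
      have hk : xs[i - (cur + 1)]? = some x := runLen_get x xs (i - (cur + 1)) (by omega)
      rw [hcurget, ← hk, hxs, List.getElem?_drop]
      congr 1; omega
    have hsplit : PySem.List.pyRange ((cur : Int) + 1) (f.length : Int) 1
        = PySem.List.pyRange ((cur : Int) + 1) ((cur + 1 + r : Nat) : Int) 1
          ++ PySem.List.pyRange ((cur + 1 + r : Nat) : Int) (f.length : Int) 1 := by
      apply PySem.List.pyRange_one_append <;> push_cast <;> omega
    have hfold1 := fold_id f s cf cs cur (cur + 1 + r) (by omega) hrun
    have hdropF : (f.drop cur).drop (r + 1) = f.drop (cur + 1 + r) := by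
      rw [List.drop_drop]; congr 1; omega
    have hdropS : (s.drop cur).drop (r + 1) = s.drop (cur + 1 + r) := by
      rw [List.drop_drop]; congr 1; omega
    have hstep1 : chunkGo (f.drop cur).length (f.drop cur) (s.drop cur)
        = ((f.drop cur).take (r + 1)
            :: (chunkGo (f.drop (cur + 1 + r)).length (f.drop (cur + 1 + r)) (s.drop (cur + 1 + r))).1,
           (s.drop cur).take (r + 1)
            :: (chunkGo (f.drop (cur + 1 + r)).length (f.drop (cur + 1 + r)) (s.drop (cur + 1 + r))).2) := by
      rw [hdlen]
      have hpos : f.length - cur = (f.length - cur - 1) + 1 := by omega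
      rw [hpos]
      conv_lhs => rw [hx]
      simp only [chunkGo, ← hr, ← hx, hdropF, hdropS]
      rw [chunkGo_fuel (f.drop (cur + 1 + r)).length (f.drop (cur + 1 + r)) (s.drop (cur + 1 + r))
            le_rfl (f.length - cur - 1) (f.drop (cur + 1 + r)).length (by simp; omega) le_rfl]
    by_cases hend : cur + 1 + r = f.length
    · -- the run reaches the end of the array: the remaining range is empty
      have hnil : PySem.List.pyRange ((cur + 1 + r : Nat) : Int) (f.length : Int) 1 = [] := by
        apply PySem.List.pyRange_one_eq_nil; push_cast; omega
      have hrecnil : f.drop (cur + 1 + r) = [] := by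
        apply List.drop_eq_nil_of_le; omega
      simp only [hsplit, List.foldl_append, hfold1, hnil, List.foldl_nil]
      rw [hstep1, hrecnil, chunkGo_nil]
      have htF : (f.drop cur).take (r + 1) = f.drop cur :=
        List.take_of_length_le (by simp; omega)
      have htS : (s.drop cur).take (r + 1) = s.drop cur :=
        List.take_of_length_le (by simp [hlen]; omega)
      simp [htF, htS, PySem.List.slice_from_natCast]
    · -- the run ends strictly before the end: index cur+1+r fires the step, then recurse
      have hlt : cur + 1 + r < f.length := by omega
      have hcons : PySem.List.pyRange ((cur + 1 + r : Nat) : Int) (f.length : Int) 1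
          = ((cur + 1 + r : Nat) : Int)
            :: PySem.List.pyRange (((cur + 1 + r : Nat) : Int) + 1) (f.length : Int) 1 := by
        apply PySem.List.pyRange_one_cons; push_cast; omega
      have hneq : f[cur + 1 + r]? ≠ f[cur]? := by
        rw [hcurget]
        have he : f[cur + 1 + r]? = xs[r]? := by
          rw [hxs, List.getElem?_drop]
        rw [he]; exact runLen_stop x xs
      have hstep : aStep f s ((cf, cs), (cur : Int)) ((cur + 1 + r : Nat) : Int)
          = ((cf ++ [PySem.List.slice f (some (cur : Int)) (some ((cur + 1 + r : Nat) : Int))],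
              cs ++ [PySem.List.slice s (some (cur : Int)) (some ((cur + 1 + r : Nat) : Int))]),
             ((cur + 1 + r : Nat) : Int)) := by
        simp only [aStep, PySem.List.pyGet?_natCast]
        rw [if_pos hneq]
      have hIH := IH (f.length - (cur + 1 + r)) (by omega) (cur + 1 + r)
        (cf ++ [PySem.List.slice f (some (cur : Int)) (some ((cur + 1 + r : Nat) : Int))])
        (cs ++ [PySem.List.slice s (some (cur : Int)) (some ((cur + 1 + r : Nat) : Int))])
        hlt rfl
      have hpc : (((cur + 1 + r : Nat) : Int) + 1) = (((cur + 1 + r + 1 : Nat)) : Int) := by push_cast; ring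
      simp only [hsplit, List.foldl_append, hfold1, hcons, List.foldl_cons, hstep]
      simp only at hIH
      rw [hIH, hstep1]
      have hsliceF : PySem.List.slice f (some (cur : Int)) (some ((cur + 1 + r : Nat) : Int))
          = (f.drop cur).take (r + 1) := by
        rw [PySem.List.slice_natCast]; congr 1; omega
      have hsliceS : PySem.List.slice s (some (cur : Int)) (some ((cur + 1 + r : Nat) : Int))
          = (s.drop cur).take (r + 1) := by
        rw [PySem.List.slice_natCast]; congr 1; omega
      rw [hsliceF, hsliceS]
      simp

-- ---- B's staged cuts equal chunkGo ----

lemma get_cons_run (x : Int) (xs : List Int) (i : Nat) (hi : i ≤ runLen x xs) :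
    (x :: xs)[i]? = some x := by
  cases i with
  | zero => simp
  | succ k => simpa using runLen_get x xs k (by omega)

-- splitting the change list at the first run
lemma changes_all (x : Int) (xs : List Int) (h : runLen x xs = xs.length) :
    pvChanges (x :: xs) = [] := by
  unfold pvChanges
  rw [List.filter_eq_nil_iff.mpr, List.map_nil]
  intro i hi
  simp only [List.mem_range] at hi
  simp only [List.length_cons] at hi
  have h1 : (x :: xs)[i]? = some x := get_cons_run x xs i (by omega)
  have h2 : (x :: xs)[i + 1]? = some x := get_cons_run x xs (i + 1) (by omega)
  simp [h1, h2]

lemma changes_split (x : Int) (xs : List Int) (h : runLen x xs < xs.length) :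
    pvChanges (x :: xs)
      = (runLen x xs + 1) :: (pvChanges ((x :: xs).drop (runLen x xs + 1))).map (· + (runLen x xs + 1)) := by
  set r := runLen x xs with hr
  set g := (x :: xs).drop (r + 1) with hg
  have hglen : g.length = xs.length - r := by simp [hg]
  unfold pvChanges
  have hrange : List.range ((x :: xs).length - 1) = List.range (r + 1) ++ (List.range (g.length - 1)).map ((r + 1) + ·) := by
    rw [← List.range_add]
    congr 1
    simp [hglen]; omega
  rw [hrange, List.filter_append, List.filter_map]
  have h1 : (List.range (r + 1)).filter (fun i => decide ((x :: xs)[i]? ≠ (x :: xs)[i + 1]?)) = [r] := by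
    rw [List.range_succ, List.filter_append]
    have hnilpart : (List.range r).filter (fun i => decide ((x :: xs)[i]? ≠ (x :: xs)[i + 1]?)) = [] := by
      apply List.filter_eq_nil_iff.mpr
      intro i hi
      simp only [List.mem_range] at hi
      have h1 : (x :: xs)[i]? = some x := get_cons_run x xs i (by omega)
      have h2 : (x :: xs)[i + 1]? = some x := get_cons_run x xs (i + 1) (by omega)
      simp [h1, h2]
    rw [hnilpart]
    have hr1 : (x :: xs)[r]? = some x := get_cons_run x xs r le_rfl
    have hne' : ¬(x :: xs)[r]? = xs[r]? := by
      rw [hr1]; exact fun hc => runLen_stop x xs hc.symm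
    simp [hne']
  rw [h1]
  have h2 : ∀ i : Nat, (x :: xs)[(r + 1) + i]? = g[i]? := by
    intro i
    rw [hg, List.getElem?_drop]
  have hfilt : (List.range (g.length - 1)).filter ((fun i => decide ((x :: xs)[i]? ≠ (x :: xs)[i + 1]?)) ∘ ((r + 1) + ·))
      = (List.range (g.length - 1)).filter (fun i => decide (g[i]? ≠ g[i + 1]?)) := by
    apply List.filter_congr
    intro i _
    simp only [Function.comp]
    rw [show (r + 1) + i + 1 = (r + 1) + (i + 1) by omega, h2, h2]
  rw [hfilt]
  simp only [List.map_cons, List.map_map, List.cons_append, List.nil_append]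
  congr 1
  apply List.map_congr_left
  intro i _
  simp only [Function.comp]
  omega

lemma cuts_all (x : Int) (xs : List Int) (h : runLen x xs = xs.length) :
    pvCuts (x :: xs) = [0, xs.length + 1] := by
  unfold pvCuts
  rw [changes_all x xs h]
  simp

lemma cuts_split (x : Int) (xs : List Int) (h : runLen x xs < xs.length) :
    pvCuts (x :: xs) = 0 :: (pvCuts ((x :: xs).drop (runLen x xs + 1))).map (· + (runLen x xs + 1)) := by
  set r := runLen x xs with hr
  set g := (x :: xs).drop (r + 1) with hg
  have hglen : g.length = xs.length - r := by simp [hg]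
  unfold pvCuts
  rw [changes_split x xs h]
  simp only [List.map_cons, List.map_append, List.map_nil, List.cons_append, List.length_cons,
    Nat.zero_add]
  congr 3
  rw [show g.length + (r + 1) = xs.length + 1 from by omega]

lemma sliceAt_shift (a : List Int) (k : Nat) (p : Nat × Nat) :
    pvSliceAt a (p.1 + k, p.2 + k) = pvSliceAt (a.drop k) p := by
  unfold pvSliceAt
  rw [List.drop_drop]
  congr 1
  · omega
  · congr 1; omega

lemma zip_tail_map_shift (t : List Nat) (k : Nat) :
    ((0 + k) :: t.map (· + k)).zip (t.map (· + k)) = ((0 :: t).zip t).map (fun p => (p.1 + k, p.2 + k)) := by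
  have h : ((0 + k) :: t.map (· + k)) = (0 :: t).map (· + k) := by simp
  rw [h, List.zip_map]
  apply List.map_congr_left
  intro p _
  rfl

lemma alt_eq_chunkGo : ∀ (d : Nat) (f s : List Int), f.length ≤ d → f ≠ [] →
    chunkGo f.length f s
      = (((pvCuts f).zip (pvCuts f).tail).map (pvSliceAt f),
         ((pvCuts f).zip (pvCuts f).tail).map (pvSliceAt s)) := by
  intro d
  induction d using Nat.strong_induction_on with
  | _ d IH =>
    intro f s hd hne
    match f with
    | x :: xs =>
      set r := runLen x xs with hr
      have hrle : r ≤ xs.length := runLen_le x xs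
      have hstep : chunkGo (x :: xs).length (x :: xs) s
          = ((x :: xs).take (r + 1)
              :: (chunkGo (xs.length - r) ((x :: xs).drop (r + 1)) (s.drop (r + 1))).1,
             s.take (r + 1)
              :: (chunkGo (xs.length - r) ((x :: xs).drop (r + 1)) (s.drop (r + 1))).2) := by
        simp only [List.length_cons, chunkGo, ← hr]
        rw [chunkGo_fuel ((x :: xs).drop (r + 1)).length ((x :: xs).drop (r + 1)) (s.drop (r + 1))
              le_rfl xs.length (xs.length - r)
              (by simp only [List.length_drop, List.length_cons]; omega)
              (by simp only [List.length_drop, List.length_cons]; omega)]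
      by_cases hend : r = xs.length
      · -- single run: one chunk covering the whole array
        rw [hstep]
        have hrecnil : (x :: xs).drop (r + 1) = [] := by
          apply List.drop_eq_nil_of_le; simp; omega
        rw [hrecnil, chunkGo_nil, cuts_all x xs hend]
        simp [pvSliceAt, hend]
      · -- the first run is a proper prefix: peel it off and recurse
        have hlt : r < xs.length := by omega
        set g := (x :: xs).drop (r + 1) with hg
        have hglen : g.length = xs.length - r := by simp [hg]
        have hgne : g ≠ [] := by
          intro hc
          rw [hc] at hglen
          simp at hglen
          omega
        have hd' : xs.length + 1 ≤ d := by simpa using hd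
        have hIH := IH g.length (by omega) g (s.drop (r + 1)) le_rfl hgne
        rw [hstep, ← hglen, hIH, cuts_split x xs hlt, ← hr, ← hg]
        -- cuts f = 0 :: (cuts g).map (+ (r+1)); head of the mapped list is 0 + (r+1)
        obtain ⟨t, ht⟩ : ∃ t, pvCuts g = 0 :: t := ⟨_, rfl⟩
        rw [ht]
        simp only [List.map_cons, List.tail_cons, List.zip_cons_cons, zip_tail_map_shift,
          List.map_map, Function.comp_def]
        have hfst : ∀ a : List Int, pvSliceAt a (0, 0 + (r + 1)) = a.take (r + 1) := by
          intro a; unfold pvSliceAt; simp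
        have hmap : ∀ a : List Int,
            ((0 :: t).zip t).map (fun p => pvSliceAt a (p.1 + (r + 1), p.2 + (r + 1)))
              = ((0 :: t).zip t).map (fun p => pvSliceAt (a.drop (r + 1)) p) := by
          intro a
          apply List.map_congr_left
          intro p _
          exact sliceAt_shift a (r + 1) p
        rw [hfst, hfst, hmap, hmap, hg]

-- ===== VERDICT (by name: the statement is the Claim_ definition above) =====
theorem chunk_arrays_spec : Claim_equal_chunk_arrays := by
  intro f s _ hpre
  unfold Pre_chunk_arrays at hpre
  by_cases hne : f = []
  · subst hne
    have hs : s = [] := List.length_eq_zero_iff.mp (by simpa using hpre.symm)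
    subst hs
    decide
  · have hlen : 0 < f.length := List.length_pos_of_ne_nil hne
    have h := main_lemma f s hpre.symm f.length 0 [] [] hlen (by omega)
    simp only [List.drop_zero, List.nil_append, Nat.cast_zero, zero_add] at h
    unfold Spec_chunk_arrays chunk_arrays chunk_arrays_alt
    rw [h, alt_eq_chunkGo f.length f s le_rfl hne]
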